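-- pv_equiv track=rewrite | github.com/wonyongchung/CodingTest | h_index.py | solution
-- ===== SOURCE A (Python) =====
-- def solution(citations):
--     answer = 0
--     a=max(citations)
--     b=len(citations)
--     tmp1=0
--     tmp2=0
--     for i in range(a+1):
--         for j in range(b):
--             if citations[j]>=i:
--                 tmp1+=1
--             if citations[j]<=i:
--                 tmp2+=1
--         if tmp1==tmp2:
--             answer=i
--             break
--         else:
--             tmp1=0
--             tmp2=0
--     return answer
-- ===== SOURCE B (Python) =====
-- def solution(citations):
--     # diff(i) = count(> i) - count(< i); non-increasing in i, zero exactly where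
--     # count(>= i) == count(<= i). Binary-search the first i in [0, max] where it
--     # drops to <= 0; that is the smallest balanced i if one exists, else answer 0.
--     def diff(i):
--         return sum(1 for c in citations if c > i) - sum(1 for c in citations if c < i)
--     lo, hi = 0, max(citations)
--     while lo < hi:
--         mid = (lo + hi) // 2
--         if diff(mid) <= 0:
--             hi = mid
--         else:
--             lo = mid + 1
--     return lo if diff(lo) == 0 else 0
-- ===== Notes on version B (the rewrite author's own statement) =====
-- stated objective: faster
-- what changed: A scans i = 0..max(citations) and recounts the whole list for every i until the counts balance; B uses that diff(i) = count(>i) - count(<i) is non-increasing and binary-searches the first i in [0, max] where it drops to <= 0, answering i if the drop hits exactly zero and 0 otherwise. Pre_ excludes only the empty list, on which both programs raise ValueError from max([]).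
-- outside the precondition, e.g. on solution([]): A raises ValueError, B raises ValueError
import Mathlib
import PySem

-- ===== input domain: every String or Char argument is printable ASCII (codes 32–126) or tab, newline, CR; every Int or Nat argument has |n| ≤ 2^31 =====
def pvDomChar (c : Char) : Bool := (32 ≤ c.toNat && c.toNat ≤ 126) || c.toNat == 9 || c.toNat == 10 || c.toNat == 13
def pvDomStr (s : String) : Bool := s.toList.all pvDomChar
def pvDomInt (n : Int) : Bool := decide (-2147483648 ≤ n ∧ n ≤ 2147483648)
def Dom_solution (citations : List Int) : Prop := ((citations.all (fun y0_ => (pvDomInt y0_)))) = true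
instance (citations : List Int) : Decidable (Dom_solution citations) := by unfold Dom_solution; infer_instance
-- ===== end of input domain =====

-- B replaces A's linear scan over i = 0..max (a full recount of the list at each i)
-- with a binary search on i for the zero of the non-increasing count difference; objective: faster.

-- ===== PORT A =====
-- inner 'for j in range(b)' pass computing (tmp1, tmp2) for a given i
def solCounts (citations : List Int) (i : Int) : Int × Int :=
  (PySem.List.pyRange 0 (PySem.List.len citations) 1).foldl
    (fun t j =>
      let c := PySem.List.pyGetD citations j 0
      ((if c ≥ i then t.1 + 1 else t.1), (if c ≤ i then t.2 + 1 else t.2)))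
    (0, 0)

-- outer 'for i in range(a+1)' with break: returns the first i with tmp1 == tmp2, else answer = 0
def solLoop (citations : List Int) (i b : Int) : Int :=
  if h : i < b then
    let t := solCounts citations i
    if t.1 == t.2 then i else solLoop citations (i + 1) b
  else 0
termination_by (b - i).toNat
decreasing_by omega

def solution (citations : List Int) : Int :=
  match PySem.List.max? citations (fun x => x) with
  | none => 0   -- Python raises ValueError on max([]); excluded by Pre_solution
  | some a => solLoop citations 0 (a + 1)

-- ===== PORT B =====
-- diff(i) = count(> i) - count(< i), the two generator-expression sums
def altDiff (citations : List Int) (i : Int) : Int :=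
  (citations.foldl (fun acc c => if c > i then acc + 1 else acc) 0)
  - (citations.foldl (fun acc c => if c < i then acc + 1 else acc) 0)

-- the 'while lo < hi' binary-search loop
def altSearch (citations : List Int) (lo hi : Int) : Int :=
  if h : lo < hi then
    let mid := PySem.Int.floordiv (lo + hi) 2
    if altDiff citations mid ≤ 0 then altSearch citations lo mid
    else altSearch citations (mid + 1) hi
  else lo
termination_by (hi - lo).toNat
decreasing_by
  · have h1 : lo * 2 ≤ lo + hi := by omega
    have := (PySem.Int.le_floordiv_iff_mul_le (a := lo + hi) (b := 2) (q := lo) (by omega)).mpr h1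
    have h2 := (PySem.Int.floordiv_lt_iff_lt_mul (a := lo + hi) (b := 2) (q := hi) (by omega)).mpr (by omega)
    omega
  · have _h2 := (PySem.Int.floordiv_lt_iff_lt_mul (a := lo + hi) (b := 2) (q := hi) (by omega)).mpr (by omega)
    have := (PySem.Int.le_floordiv_iff_mul_le (a := lo + hi) (b := 2) (q := lo) (by omega)).mpr (by omega)
    omega

def solution_alt (citations : List Int) : Int :=
  match PySem.List.max? citations (fun x => x) with
  | none => 0   -- Python raises ValueError on max([]); excluded by Pre_solution
  | some a =>
    let lo := altSearch citations 0 a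
    if altDiff citations lo = 0 then lo else 0

-- ===== PRECONDITION & SPEC =====
-- A and B both raise ValueError (max of an empty sequence) on []: excluded.
def Pre_solution (citations : List Int) : Prop := citations ≠ []
instance (citations : List Int) : Decidable (Pre_solution citations) := by unfold Pre_solution; infer_instance
def pvWitness_solution : List Int := [3, 0, 6, 1, 5]
def Spec_solution (citations : List Int) (out : Int) : Prop := out = solution_alt citations
instance (citations : List Int) (out : Int) : Decidable (Spec_solution citations out) := by unfold Spec_solution; infer_instance

-- ===== CLAIM (what is proved, stated in full; the proofs are below) =====
def Claim_equal_solution : Prop := ∀ (citations : List Int), Dom_solution citations → Pre_solution citations → Spec_solution citations (solution citations)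

-- ===== LEMMAS AND PROOFS =====

-- counts of elements strictly below / strictly above i
def cntLt (xs : List Int) (i : Int) : Nat := xs.countP (fun c => decide (c < i))
def cntGt (xs : List Int) (i : Int) : Nat := xs.countP (fun c => decide (i < c))

-- the balance condition A tests, rephrased
abbrev Bal (xs : List Int) (i : Int) : Prop := cntLt xs i = cntGt xs i

lemma solCounts_fold (citations : List Int) (i : Int) :
    ∀ t : Int × Int, citations.foldl
      (fun t c => ((if c ≥ i then t.1 + 1 else t.1), (if c ≤ i then t.2 + 1 else t.2))) t
      = (t.1 + (citations.countP (fun c => decide (i ≤ c)) : Int),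
         t.2 + (citations.countP (fun c => decide (c ≤ i)) : Int)) := by
  induction citations with
  | nil => intro t; simp
  | cons c rest ih =>
      intro t
      rw [List.foldl_cons, ih]
      simp only [List.countP_cons, decide_eq_true_eq, ge_iff_le, Prod.ext_iff]
      constructor <;> split_ifs <;> push_cast <;> omega

lemma solCounts_eq (citations : List Int) (i : Int) :
    solCounts citations i
      = ((citations.countP (fun c => decide (i ≤ c)) : Int),
         (citations.countP (fun c => decide (c ≤ i)) : Int)) := by
  unfold solCounts
  rw [PySem.List.foldl_pyRange_zero_pyGetD citations 0
        (fun t c => ((if c ≥ i then t.1 + 1 else t.1), (if c ≤ i then t.2 + 1 else t.2))) (0, 0)]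
  simp [solCounts_fold citations i (0, 0)]

lemma countP_split (xs : List Int) (i : Int) :
    xs.countP (fun c => decide (i ≤ c)) + cntLt xs i = xs.length ∧
    xs.countP (fun c => decide (c ≤ i)) + cntGt xs i = xs.length := by
  induction xs with
  | nil => simp [cntLt, cntGt]
  | cons c rest ih =>
      simp only [cntLt, cntGt, List.countP_cons, List.length_cons, decide_eq_true_eq] at ih ⊢
      split_ifs <;> omega

-- A's test 'tmp1 == tmp2' is exactly the balance condition
lemma test_iff_bal (citations : List Int) (i : Int) :
    ((solCounts citations i).1 = (solCounts citations i).2) ↔ Bal citations i := by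
  rw [solCounts_eq]
  have h := countP_split citations i
  simp only [Bal, cntLt, cntGt] at *
  omega

-- first-match characterisation of the outer loop
lemma solLoop_none (citations : List Int) (a b : Int)
    (h : ∀ i, a ≤ i → i < b → ¬ Bal citations i) :
    solLoop citations a b = 0 := by
  rw [solLoop]
  by_cases hab : a < b
  · have hcnt : ¬ ((solCounts citations a).1 = (solCounts citations a).2) := by
      rw [test_iff_bal]; exact h a le_rfl hab
    simp only [dif_pos hab, beq_iff_eq, if_neg hcnt]
    have : (b - (a+1)).toNat < (b - a).toNat := by omega
    exact solLoop_none citations (a + 1) b (fun i h1 h2 => h i (by omega) h2)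
  · rw [dif_neg hab]
termination_by (b - a).toNat

lemma solLoop_some (citations : List Int) (a b i0 : Int)
    (h1 : a ≤ i0) (h2 : i0 < b) (hb : Bal citations i0)
    (hmin : ∀ j, a ≤ j → j < i0 → ¬ Bal citations j) :
    solLoop citations a b = i0 := by
  have hab : a < b := lt_of_le_of_lt h1 h2
  rw [solLoop, dif_pos hab]
  by_cases hea : a = i0
  · subst hea
    have : (solCounts citations a).1 = (solCounts citations a).2 := (test_iff_bal _ _).mpr hb
    simp [this]
  · have hcnt : ¬ ((solCounts citations a).1 = (solCounts citations a).2) := by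
      rw [test_iff_bal]; exact hmin a le_rfl (by omega)
    simp only [beq_iff_eq, if_neg hcnt]
    have : (b - (a+1)).toNat < (b - a).toNat := by omega
    exact solLoop_some citations (a + 1) b i0 (by omega) h2 hb
      (fun j hj1 hj2 => hmin j (by omega) hj2)
termination_by (b - a).toNat

-- ===== B-side facts =====

lemma altDiff_eq (citations : List Int) (i : Int) :
    altDiff citations i = (cntGt citations i : Int) - (cntLt citations i : Int) := by
  unfold altDiff cntGt cntLt
  rw [PySem.List.foldl_ite_add_one, PySem.List.foldl_ite_add_one]
  simp only [gt_iff_lt]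
  omega

lemma altDiff_zero_iff_bal (citations : List Int) (i : Int) :
    altDiff citations i = 0 ↔ Bal citations i := by
  rw [altDiff_eq]; unfold Bal; omega

-- diff is non-increasing in i
lemma altDiff_anti (citations : List Int) {i j : Int} (h : i ≤ j) :
    altDiff citations j ≤ altDiff citations i := by
  rw [altDiff_eq, altDiff_eq]
  have h1 : cntLt citations i ≤ cntLt citations j := by
    apply List.countP_mono_left
    intro c _ hc; simp only [decide_eq_true_eq] at *; omega
  have h2 : cntGt citations j ≤ cntGt citations i := by
    apply List.countP_mono_left
    intro c _ hc; simp only [decide_eq_true_eq] at *; omega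
  omega

-- the binary search finds the first i in [lo, hi] where diff drops to ≤ 0
lemma altSearch_spec (citations : List Int) (lo hi : Int)
    (hle : lo ≤ hi) (hhi : altDiff citations hi ≤ 0) :
    lo ≤ altSearch citations lo hi ∧ altSearch citations lo hi ≤ hi ∧
    altDiff citations (altSearch citations lo hi) ≤ 0 ∧
    (∀ j, lo ≤ j → j < altSearch citations lo hi → 0 < altDiff citations j) := by
  rw [altSearch]
  by_cases h : lo < hi
  · rw [dif_pos h]
    have hmlo := (PySem.Int.le_floordiv_iff_mul_le
      (a := lo + hi) (b := 2) (q := lo) (by omega)).mpr (by omega)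
    have hmhi := (PySem.Int.floordiv_lt_iff_lt_mul
      (a := lo + hi) (b := 2) (q := hi) (by omega)).mpr (by omega)
    set mid := PySem.Int.floordiv (lo + hi) 2 with hmid
    by_cases hd : altDiff citations mid ≤ 0
    · rw [if_pos hd]
      have : (mid - lo).toNat < (hi - lo).toNat := by omega
      have ih := altSearch_spec citations lo mid (by omega) hd
      exact ⟨ih.1, by omega, ih.2.2.1, ih.2.2.2⟩
    · rw [if_neg hd]
      have : (hi - (mid + 1)).toNat < (hi - lo).toNat := by omega
      have ih := altSearch_spec citations (mid + 1) hi (by omega) hhi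
      refine ⟨by omega, ih.2.1, ih.2.2.1, ?_⟩
      intro j hj1 hj2
      by_cases hjm : j ≤ mid
      · have := altDiff_anti citations hjm
        omega
      · exact ih.2.2.2 j (by omega) hj2
  · rw [dif_neg h]
    have heq : lo = hi := by omega
    subst heq
    exact ⟨le_rfl, le_rfl, hhi, fun j h1 h2 => absurd h2 (by omega)⟩
termination_by (hi - lo).toNat

-- ===== VERDICT (by name: the statement is the Claim_ definition above) =====
theorem solution_spec : Claim_equal_solution := by
  unfold Claim_equal_solution
  intro citations _ hpre
  unfold Spec_solution Pre_solution at *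
  cases hmax : PySem.List.max? citations (fun x => x) with
  | none => exact absurd ((PySem.List.max?_eq_none_iff _ _).mp hmax) hpre
  | some a =>
    have hmaxle : ∀ y ∈ citations, y ≤ a := fun y hy => PySem.List.max?_isMax hmax y hy
    have hn : 0 < citations.length := List.length_pos_iff.mpr hpre
    -- no element is above a, so diff(a) ≤ 0 and diff(i) < 0 for every i > a is not needed;
    have hGta : cntGt citations a = 0 := by
      unfold cntGt
      rw [List.countP_eq_zero]
      intro c hc
      have := hmaxle c hc
      simp only [decide_eq_true_eq]; omega
    simp only [solution, solution_alt, hmax]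
    by_cases ha : 0 ≤ a
    · -- binary search runs; its result r is the first i with diff ≤ 0
      have hda : altDiff citations a ≤ 0 := by rw [altDiff_eq, hGta]; omega
      obtain ⟨hr0, hra, hrd, hrmin⟩ := altSearch_spec citations 0 a ha hda
      set r := altSearch citations 0 a with hrdef
      by_cases hz : altDiff citations r = 0
      · rw [if_pos hz]
        apply solLoop_some citations 0 (a + 1) r hr0 (by omega)
          ((altDiff_zero_iff_bal _ _).mp hz)
        intro j hj1 hj2 hbj
        have := hrmin j hj1 hj2
        rw [← altDiff_zero_iff_bal] at hbj
        omega
      · rw [if_neg hz]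
        apply solLoop_none
        intro i hi1 hi2 hbi
        rw [← altDiff_zero_iff_bal] at hbi
        by_cases hir : i < r
        · have := hrmin i hi1 hir
          omega
        · have := altDiff_anti citations (show r ≤ i by omega)
          omega
    · -- max < 0: A's range(a+1) is empty; B's search keeps lo = 0, where diff < 0
      have hA : solLoop citations 0 (a + 1) = 0 := by
        rw [solLoop, dif_neg (by omega : ¬ (0 : Int) < a + 1)]
      have hB : altSearch citations 0 a = 0 := by
        rw [altSearch, dif_neg (by omega : ¬ (0 : Int) < a)]
      have hLt0 : cntLt citations 0 = citations.length := by
        unfold cntLt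
        rw [List.countP_eq_length]
        intro c hc
        have := hmaxle c hc
        simp only [decide_eq_true_eq]; omega
      have hd0 : altDiff citations 0 ≠ 0 := by
        rw [altDiff_eq, hLt0]
        have : cntGt citations 0 ≤ citations.length := List.countP_le_length
        -- cntGt 0 = 0 since every element ≤ a < 0
        have hg : cntGt citations 0 = 0 := by
          unfold cntGt
          rw [List.countP_eq_zero]
          intro c hc
          have := hmaxle c hc
          simp only [decide_eq_true_eq]; omega
        rw [hg]; omega
      rw [hA, hB, if_neg hd0]
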